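-- pv_equiv track=rewrite | github.com/flashman/code-samples | benchling/q3/q3.py | n_unique_sequences
-- ===== SOURCE A (Python) =====
-- def is_rotation_v2(s1: str, s2: str) -> bool:
--     """
--     Given two string s1 and s2, check if s1 is a rotated version of s2.
--
--     Example:
--
--     If s1 = "stackoverflow" then the following are some of its rotated versions:
--
--     "tackoverflows"
--     "ackoverflowst"
--     "overflowstack"
--     where as "stackoverflwo" is not a rotated version.
--     """
--     if len(s1) != len(s2):
--         return False
--
--     return s2 in s1 + s1
--
-- def n_unique_sequences(seqs: list[str]) -> int:
--     """
--     Given a list of sequences, return the number of unique sequences, allowing rotations.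
--     """
--     if not seqs:
--         return 0
--
--     unique = [seqs.pop()]
--     while seqs:
--         s = seqs.pop()
--         if any(is_rotation_v2(s, u) for u in unique):
--             continue
--         else:
--             unique.append(s)
--
--     return len(unique)
-- ===== SOURCE B (Python) =====
-- def n_unique_sequences(seqs: list[str]) -> int:
--     """
--     Count sequences distinct up to rotation: canonicalize each sequence to its
--     lexicographically least rotation and count distinct canonical forms.
--     (Does not mutate seqs; A empties it. Return value is identical.)
--     """
--     seen = set()
--     for s in seqs:
--         if s:
--             seen.add(min(s[i:] + s[:i] for i in range(len(s))))
--         else: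
--             seen.add(s)
--     return len(seen)
-- ===== Notes on version B (the rewrite author's own statement) =====
-- stated objective: faster
-- what changed: Instead of A's quadratic scan that tests each sequence against every kept representative with a substring-of-doubled-string rotation check, B canonicalizes each sequence to its lexicographically least rotation once and counts distinct canonical forms in a set.
import Mathlib
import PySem

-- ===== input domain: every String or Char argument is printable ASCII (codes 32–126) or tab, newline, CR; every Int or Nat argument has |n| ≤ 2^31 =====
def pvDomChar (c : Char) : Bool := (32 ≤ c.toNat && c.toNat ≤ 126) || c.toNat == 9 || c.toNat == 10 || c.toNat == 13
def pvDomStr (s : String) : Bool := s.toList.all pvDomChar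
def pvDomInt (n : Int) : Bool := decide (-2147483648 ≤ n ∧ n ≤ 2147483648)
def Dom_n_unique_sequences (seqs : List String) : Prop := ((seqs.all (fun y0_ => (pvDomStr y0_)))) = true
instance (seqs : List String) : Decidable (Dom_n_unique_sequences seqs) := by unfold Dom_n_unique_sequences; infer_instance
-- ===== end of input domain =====

-- B canonicalizes each sequence to its least rotation and counts distinct canonical forms in a set,
-- replacing A's quadratic pairwise rotation scan; equivalence is about the RETURN value only
-- (Python A empties its argument list via pop(); B does not mutate it).


-- ===== PORT A =====
-- is_rotation_v2(s1, s2): False on unequal lengths, else  s2 in s1 + s1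
def is_rotation_v2 (s1 s2 : String) : Bool :=
  if PySem.Str.len s1 ≠ PySem.Str.len s2 then false
  else PySem.Chars.isIn s2.toList (s1.toList ++ s1.toList)

-- A pops from the END of seqs: first `unique = [seqs.pop()]`, then the while loop pops the rest,
-- so A processes seqs.reverse with the first popped element as the initial `unique` list.
def n_unique_sequences (seqs : List String) : Int :=
  match seqs.reverse with
  | [] => 0
  | x :: rest =>
    ((rest.foldl (fun unique s =>
        if unique.any (fun u => is_rotation_v2 s u) then unique
        else unique ++ [s]) [x]).length : Int)

-- ===== PORT B =====
-- min(s[i:] + s[:i] for i in range(len(s))) on the code points of s (Python str '<' is '<' on List Char)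
def pvCanon (s : List Char) : List Char :=
  if s = [] then s
  else
    -- min over the rotation list; the explicit instances name the lexicographic order on code
    -- points (Python's str '<'), in the form PySem's min? lemmas expect
    match @PySem.List.min? (List Char) (List Char) Preorder.toLT LinearOrder.toDecidableLT
        ((List.range s.length).map
          (fun i : Nat => PySem.List.slice s (some (i : Int)) none ++ PySem.List.slice s none (some (i : Int))))
        (fun x => x) with
    | some m => m
    | none => s  -- unreachable: the rotation list is nonempty when s ≠ []

def n_unique_sequences_alt (seqs : List String) : Int :=
  ((seqs.foldl (fun seen s => PySem.Set.add seen (pvCanon s.toList)) []).length : Int)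

-- ===== PRECONDITION & SPEC =====
def Spec_n_unique_sequences (seqs : List String) (out : Int) : Prop := out = n_unique_sequences_alt seqs
instance (seqs : List String) (out : Int) : Decidable (Spec_n_unique_sequences seqs out) := by unfold Spec_n_unique_sequences; infer_instance

-- ===== CLAIM (what is proved, stated in full; the proofs are below) =====
def Claim_equal_n_unique_sequences : Prop := ∀ (seqs : List String), Dom_n_unique_sequences seqs → Spec_n_unique_sequences seqs (n_unique_sequences seqs)

-- ===== LEMMAS AND PROOFS =====

-- a window of length l.length inside l ++ l is a rotation of l
theorem pv_rot_window (l : List Char) (i : Nat) (h : i ≤ l.length) :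
    ((l ++ l).drop i).take l.length = l.rotate i := by
  rw [List.drop_append_of_le_length h, List.rotate_eq_drop_append_take h, List.take_append]
  simp [List.length_drop, Nat.sub_sub_self h]

theorem pv_rotate_infix_doubled (l : List Char) (n : Nat) : l.rotate n <:+: (l ++ l) := by
  rcases Nat.eq_zero_or_pos l.length with h0 | h0
  · have : l = [] := List.length_eq_zero_iff.mp h0
    subst this; simp
  · have h : n % l.length ≤ l.length := (Nat.mod_lt _ h0).le
    rw [← List.rotate_mod, List.rotate_eq_drop_append_take h]
    refine ⟨l.take (n % l.length), l.drop (n % l.length), ?_⟩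
    rw [← List.append_assoc, List.take_append_drop, List.append_assoc, List.take_append_drop]

-- '  s2 in s1 + s1  ' with equal lengths IS the rotation relation
theorem pv_infix_doubled_iff (l l' : List Char) (hlen : l'.length = l.length) :
    l' <:+: (l ++ l) ↔ l ~r l' := by
  constructor
  · rintro ⟨s, t, hst⟩
    have hsl : s.length ≤ l.length := by
      have := congrArg List.length hst
      simp at this; omega
    have he : l' = ((l ++ l).drop s.length).take l'.length := by
      rw [← hst, List.append_assoc, List.drop_left, List.take_left]
    rw [he, hlen, pv_rot_window l s.length hsl]
    exact ⟨s.length, rfl⟩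
  · rintro ⟨n, rfl⟩
    exact pv_rotate_infix_doubled l n

-- the list B takes the min of is exactly the rotations of s
theorem pv_rotations_eq (s : List Char) :
    (List.range s.length).map
        (fun i : Nat => PySem.List.slice s (some (i : Int)) none ++ PySem.List.slice s none (some (i : Int)))
      = (List.range s.length).map s.rotate := by
  refine List.map_congr_left ?_
  intro i hi
  rw [PySem.List.slice_from_natCast, PySem.List.slice_to_natCast,
    List.rotate_eq_drop_append_take (le_of_lt (List.mem_range.mp hi))]

theorem pv_mem_rotations (s x : List Char) (hs : s ≠ []) :
    x ∈ (List.range s.length).map s.rotate ↔ s ~r x := by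
  have hlen : 0 < s.length := List.length_pos_iff.mpr hs
  simp only [List.mem_map, List.mem_range]
  constructor
  · rintro ⟨i, _, rfl⟩
    exact ⟨i, rfl⟩
  · intro hx
    rcases List.isRotated_iff_mod.mp hx with ⟨n, hn, rfl⟩
    rcases Nat.lt_or_ge n s.length with h | h
    · exact ⟨n, h, rfl⟩
    · have hn' : n = s.length := le_antisymm hn h
      exact ⟨0, hlen, by rw [hn', List.rotate_length, List.rotate_zero]⟩

theorem pv_canon_spec (s : List Char) (hs : s ≠ []) :
    s ~r pvCanon s ∧ ∀ x, s ~r x → pvCanon s ≤ x := by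
  unfold pvCanon
  rw [if_neg hs, pv_rotations_eq]
  have hne : (List.range s.length).map s.rotate ≠ [] := by
    simp [List.range_eq_nil, hs]
  rcases hm : @PySem.List.min? (List Char) (List Char) Preorder.toLT LinearOrder.toDecidableLT
      ((List.range s.length).map s.rotate) (fun x => x) with _ | m
  · exact absurd ((@PySem.List.min?_eq_none_iff (List Char) (List Char) Preorder.toLT
      LinearOrder.toDecidableLT _ _).mp hm) hne
  · constructor
    · exact (pv_mem_rotations s m hs).mp
        (@PySem.List.min?_mem (List Char) (List Char) Preorder.toLT LinearOrder.toDecidableLT _ _ _ hm)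
    · intro x hx
      exact PySem.List.min?_isMin hm x ((pv_mem_rotations s x hs).mpr hx)

theorem pv_canon_nil : pvCanon [] = [] := rfl

theorem pv_canon_length (s : List Char) : (pvCanon s).length = s.length := by
  rcases eq_or_ne s [] with rfl | hs
  · rfl
  · exact ((pv_canon_spec s hs).1.perm.length_eq).symm

-- rotation-equivalence ↔ equal canonical forms
theorem pv_rot_iff_canon_eq (s u : List Char) : s ~r u ↔ pvCanon s = pvCanon u := by
  rcases eq_or_ne s [] with rfl | hs
  · rw [List.isRotated_nil_iff']
    constructor
    · rintro rfl; rfl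
    · intro h
      have := pv_canon_length u
      rw [← h, pv_canon_nil] at this
      exact (List.length_eq_zero_iff.mp this.symm).symm
  · rcases eq_or_ne u [] with rfl | hu
    · rw [List.isRotated_nil_iff]
      constructor
      · rintro rfl; rfl
      · intro h
        have := pv_canon_length s
        rw [h, pv_canon_nil] at this
        exact List.length_eq_zero_iff.mp this.symm
    · obtain ⟨hsrot, hsmin⟩ := pv_canon_spec s hs
      obtain ⟨hurot, humin⟩ := pv_canon_spec u hu
      constructor
      · intro h
        exact le_antisymm (hsmin _ (h.trans hurot)) (humin _ (h.symm.trans hsrot))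
      · intro h
        exact (hsrot.trans (h ▸ hurot.symm)).symm.symm

-- A's pairwise test decides equality of B's canonical forms
theorem pv_is_rotation_iff (s u : String) :
    is_rotation_v2 s u = true ↔ pvCanon s.toList = pvCanon u.toList := by
  unfold is_rotation_v2
  rcases eq_or_ne (PySem.Str.len s) (PySem.Str.len u) with hlen | hlen
  · have hl : u.toList.length = s.toList.length := by
      have h1 := PySem.Str.len_eq s
      have h2 := PySem.Str.len_eq u
      rw [hlen, h2] at h1
      omega
    rw [if_neg (fun h => h hlen)]
    rw [PySem.Chars.isIn_iff_infix, pv_infix_doubled_iff _ _ hl, pv_rot_iff_canon_eq]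
  · rw [if_pos hlen]
    simp only [Bool.false_eq_true, false_iff]
    intro h
    apply hlen
    have hc := congrArg List.length h
    rw [pv_canon_length, pv_canon_length] at hc
    rw [PySem.Str.len_eq, PySem.Str.len_eq, hc]

-- one step of A's loop, viewed through the canonical form, is Set.add
theorem pv_stepA_map (us : List String) (s : String) :
    (if us.any (fun u => is_rotation_v2 s u) then us else us ++ [s]).map (fun t => pvCanon t.toList)
      = PySem.Set.add (us.map (fun t => pvCanon t.toList)) (pvCanon s.toList) := by
  by_cases hmem : pvCanon s.toList ∈ us.map (fun t => pvCanon t.toList)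
  · have hany : (us.any fun u => is_rotation_v2 s u) = true := by
      rcases List.mem_map.mp hmem with ⟨u, hu, hc⟩
      exact List.any_eq_true.mpr ⟨u, hu, (pv_is_rotation_iff s u).mpr hc.symm⟩
    rw [PySem.Set.add_of_mem hmem, if_pos hany]
  · have hany : ¬ (us.any fun u => is_rotation_v2 s u) = true := by
      intro hany
      rcases List.any_eq_true.mp hany with ⟨u, hu, hr⟩
      exact hmem (List.mem_map.mpr ⟨u, hu, ((pv_is_rotation_iff s u).mp hr).symm⟩)
    rw [PySem.Set.add_of_not_mem hmem, if_neg hany, List.map_append, List.map_cons, List.map_nil]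

-- A's whole loop, through the canonical form, is B's set fold
theorem pv_foldA_map (l us : List String) :
    ((l.foldl (fun unique s =>
        if unique.any (fun u => is_rotation_v2 s u) then unique
        else unique ++ [s]) us).map (fun t => pvCanon t.toList))
      = (l.map (fun t => pvCanon t.toList)).foldl PySem.Set.add (us.map (fun t => pvCanon t.toList)) := by
  induction l generalizing us with
  | nil => rfl
  | cons x xs ih =>
    simp only [List.foldl_cons, List.map_cons]
    rw [ih, pv_stepA_map]

theorem pv_ofList_length_reverse (xs : List (List Char)) :
    (PySem.Set.ofList xs.reverse).length = (PySem.Set.ofList xs).length := by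
  refine List.Perm.length_eq ?_
  refine (List.perm_ext_iff_of_nodup (PySem.Set.nodup_ofList _) (PySem.Set.nodup_ofList _)).mpr ?_
  intro a
  rw [PySem.Set.mem_ofList, PySem.Set.mem_ofList, List.mem_reverse]

-- ===== VERDICT (by name: the statement is the Claim_ definition above) =====
theorem n_unique_sequences_spec : Claim_equal_n_unique_sequences := by
  intro seqs _
  unfold Spec_n_unique_sequences n_unique_sequences n_unique_sequences_alt
  have hB : (seqs.foldl (fun seen s => PySem.Set.add seen (pvCanon s.toList)) []).length
      = (PySem.Set.ofList (seqs.map (fun t => pvCanon t.toList))).length := by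
    rw [PySem.Set.ofList_eq_foldl, List.foldl_map]
  rcases hr : seqs.reverse with _ | ⟨x, rest⟩
  · have hnil : seqs = [] := by simpa using congrArg List.reverse hr
    subst hnil; rfl
  · have hA : ((rest.foldl (fun unique s =>
        if unique.any (fun u => is_rotation_v2 s u) then unique
        else unique ++ [s]) [x]).length : Int)
        = ((PySem.Set.ofList (seqs.reverse.map (fun t => pvCanon t.toList))).length : Int) := by
      rw [← List.length_map (f := fun t => pvCanon t.toList), pv_foldA_map, hr]
      simp only [List.map_cons, List.map_nil, PySem.Set.ofList_eq_foldl, List.foldl_cons,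
        List.foldl_map]
      rfl
    show ((rest.foldl (fun unique s =>
        if unique.any (fun u => is_rotation_v2 s u) then unique
        else unique ++ [s]) [x]).length : Int)
      = ((seqs.foldl (fun seen s => PySem.Set.add seen (pvCanon s.toList)) []).length : Int)
    rw [hA, hB, List.map_reverse, pv_ofList_length_reverse (seqs.map (fun t => pvCanon t.toList))]
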